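-- pv_equiv track=rewrite | github.com/andynet/maria | scripts/create_col.py | map_msa_to_T
-- ===== SOURCE A (Python) =====
-- def map_msa_to_T(msa):
--     msa_to_T = {}
--     N = len(msa)
--     pos = 0
--     for i in range(N):
--         col = 0
--         for j in range(len(msa[i])):
--             if msa[i][j] != '-':
--                 msa_to_T[(i,col)] = pos
--                 col += 1
--                 pos += 1
--     msa_to_T[ (N-1, len(msa[N-1])-1) ] = pos # the \# value at the end of T
--     return msa_to_T
-- ===== SOURCE B (Python) =====
-- def map_msa_to_T(msa):
--     counts = [sum(1 for ch in row if ch != '-') for row in msa]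
--     prefix = [0]
--     for c in counts:
--         prefix.append(prefix[-1] + c)
--     msa_to_T = {}
--     for i, (row, base) in enumerate(zip(msa, prefix)):
--         col = 0
--         for ch in row:
--             if ch != '-':
--                 msa_to_T[(i, col)] = base + col
--                 col += 1
--     msa_to_T[(len(msa) - 1, len(msa[-1]) - 1)] = prefix[-1]
--     return msa_to_T
-- ===== Notes on version B (the rewrite author's own statement) =====
-- stated objective: alternative
-- what changed: Replaces A's single global position counter threaded through all rows with a precomputed per-row prefix-offset table and a second pass that fills each row independently from its offset.
import Mathlib
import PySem

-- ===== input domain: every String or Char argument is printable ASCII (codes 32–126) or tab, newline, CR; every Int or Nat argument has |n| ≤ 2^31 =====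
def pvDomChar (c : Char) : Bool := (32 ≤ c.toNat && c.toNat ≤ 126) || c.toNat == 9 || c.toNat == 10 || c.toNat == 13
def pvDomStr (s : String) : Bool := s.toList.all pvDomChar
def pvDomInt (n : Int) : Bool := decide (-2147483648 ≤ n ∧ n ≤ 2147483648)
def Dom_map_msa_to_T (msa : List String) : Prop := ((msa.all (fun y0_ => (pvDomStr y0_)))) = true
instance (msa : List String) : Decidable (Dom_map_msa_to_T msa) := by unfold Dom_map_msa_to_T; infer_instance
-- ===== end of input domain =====

-- B replaces A's single threaded position counter with a precomputed per-row prefix-offset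
-- table and a second pass that fills each row independently (objective: alternative decomposition).

-- ===== PORT A =====
-- inner loop of A: for j in range(len(msa[i])): if msa[i][j] != '-': d[(i,col)] = pos; col += 1; pos += 1
def aStepInner (i : Int) (s : PySem.Dict (Int × Int) Int × Int × Int) (c : Char) :
    PySem.Dict (Int × Int) Int × Int × Int :=
  if c ≠ '-' then (s.1.insert (i, s.2.1) s.2.2, s.2.1 + 1, s.2.2 + 1) else s

-- one iteration of A's outer loop: state (dict, pos), row (i, msa[i]); col starts at 0
def aStepRow (st : PySem.Dict (Int × Int) Int × Int) (p : Int × String) :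
    PySem.Dict (Int × Int) Int × Int :=
  let r := p.2.toList.foldl (aStepInner p.1) (st.1, 0, st.2)
  (r.1, r.2.2)

def map_msa_to_T (msa : List String) : List (Int × Int × Int) :=
  let N : Int := (msa.length : Int)
  let st := (PySem.List.enumerate msa 0).foldl aStepRow (PySem.Dict.empty, 0)
  match PySem.List.pyGet? msa (N - 1) with
  | none => []      -- msa[N-1] raises IndexError on msa = []; excluded by Pre_
  | some lastRow =>
      ((st.1.insert (N - 1, PySem.Str.len lastRow - 1) st.2).items).map
        (fun q => (q.1.1, q.1.2, q.2))

-- ===== PORT B =====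
-- prefix list: prefix = [0]; for c in counts: prefix.append(prefix[-1] + c)
def altPrefix (t : Int) : List Int → List Int
  | [] => [t]
  | c :: rest => t :: altPrefix (t + c) rest

-- inner loop of B: for ch in row: if ch != '-': d[(i,col)] = base + col; col += 1
def bStepInner (i base : Int) (s : PySem.Dict (Int × Int) Int × Int) (ch : Char) :
    PySem.Dict (Int × Int) Int × Int :=
  if ch ≠ '-' then (s.1.insert (i, s.2) (base + s.2), s.2 + 1) else s

-- one iteration of B's loop over enumerate(zip(msa, prefix)): p = (i, (row, base))
def bStepRow (d : PySem.Dict (Int × Int) Int) (p : Int × String × Int) :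
    PySem.Dict (Int × Int) Int :=
  (p.2.1.toList.foldl (bStepInner p.1 p.2.2) (d, 0)).1

def map_msa_to_T_alt (msa : List String) : List (Int × Int × Int) :=
  let counts : List Int := msa.map (fun row => ((row.toList.filter (fun ch => ch ≠ '-')).length : Int))
  let pre := altPrefix 0 counts
  let d := (PySem.List.enumerate (msa.zip pre) 0).foldl bStepRow PySem.Dict.empty
  match PySem.List.pyGet? msa (-1) with
  | none => []      -- msa[-1] raises IndexError on msa = []; excluded by Pre_
  | some lastRow =>
      ((d.insert ((msa.length : Int) - 1, PySem.Str.len lastRow - 1) (PySem.List.pyGetD pre (-1) 0)).items).map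
        (fun q => (q.1.1, q.1.2, q.2))

-- ===== PRECONDITION & SPEC =====
-- Pre_ excludes only the empty list, on which A's final "msa[N-1]" raises IndexError.
def Pre_map_msa_to_T (msa : List String) : Prop := msa ≠ []
instance (msa : List String) : Decidable (Pre_map_msa_to_T msa) := by unfold Pre_map_msa_to_T; infer_instance
def pvWitness_map_msa_to_T : List String := ["a-b", "cd"]

def Spec_map_msa_to_T (msa : List String) (out : List (Int × Int × Int)) : Prop := out = map_msa_to_T_alt msa
instance (msa : List String) (out : List (Int × Int × Int)) : Decidable (Spec_map_msa_to_T msa out) := by unfold Spec_map_msa_to_T; infer_instance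

-- ===== CLAIM (what is proved, stated in full; the proofs are below) =====
def Claim_equal_map_msa_to_T : Prop := ∀ (msa : List String), Dom_map_msa_to_T msa → Pre_map_msa_to_T msa → Spec_map_msa_to_T msa (map_msa_to_T msa)

-- ===== LEMMAS AND PROOFS =====

-- A's inner loop equals B's inner loop when pos = base + col (dict and col agree; pos stays base + col)
theorem inner_eq (i base : Int) (cs : List Char) (d : PySem.Dict (Int × Int) Int)
    (col pos : Int) (h : pos = base + col) :
    cs.foldl (aStepInner i) (d, col, pos)
      = ((cs.foldl (bStepInner i base) (d, col)).1,
         (cs.foldl (bStepInner i base) (d, col)).2,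
         base + (cs.foldl (bStepInner i base) (d, col)).2) := by
  induction cs generalizing d col pos with
  | nil => simp [h]
  | cons c cs ih =>
    by_cases hc : c ≠ '-'
    · simp only [List.foldl_cons, aStepInner, bStepInner, if_pos hc, h]
      exact ih _ _ _ (by ring)
    · simp only [List.foldl_cons, aStepInner, bStepInner, if_neg hc]
      exact ih _ _ _ h
  
-- B's inner loop advances col by the number of non-gap characters
theorem col_count (i base : Int) (cs : List Char) (d : PySem.Dict (Int × Int) Int) (col : Int) :
    (cs.foldl (bStepInner i base) (d, col)).2
      = col + ((cs.filter (fun ch => ch ≠ '-')).length : Int) := by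
  induction cs generalizing d col with
  | nil => simp
  | cons c cs ih =>
    by_cases hc : c ≠ '-'
    · simp only [List.foldl_cons, bStepInner, if_pos hc, List.filter_cons,
        decide_eq_true hc, ih]
      push_cast [List.length_cons]; ring
    · simp only [List.foldl_cons, bStepInner, if_neg hc, List.filter_cons]
      rw [ih]
      simp only [ne_eq, not_not] at hc
      simp [hc]

-- the outer folds agree row by row
theorem outer_eq (rows : List String) (n : Int) (d : PySem.Dict (Int × Int) Int) (pos : Int) :
    (PySem.List.enumerate rows n).foldl aStepRow (d, pos)
      = ((PySem.List.enumerate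
            (rows.zip (altPrefix pos (rows.map
              (fun row => ((row.toList.filter (fun ch => ch ≠ '-')).length : Int))))) n).foldl
           bStepRow d,
         pos + (rows.map (fun row => ((row.toList.filter (fun ch => ch ≠ '-')).length : Int))).sum) := by
  induction rows generalizing n d pos with
  | nil => simp [PySem.List.enumerate_nil]
  | cons r rows ih =>
    simp only [List.map_cons, altPrefix, List.zip_cons_cons, PySem.List.enumerate_cons,
      List.foldl_cons]
    have hstep : aStepRow (d, pos) (n, r)
        = (bStepRow d (n, r, pos),
           pos + ((r.toList.filter (fun ch => ch ≠ '-')).length : Int)) := by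
      simp only [aStepRow, bStepRow]
      rw [inner_eq n pos r.toList d 0 pos (by ring)]
      simp [col_count]
    rw [hstep, ih, Prod.mk.injEq]
    exact ⟨rfl, by rw [List.sum_cons]; ring⟩

-- altPrefix never returns []
theorem altPrefix_ne_nil (t : Int) (l : List Int) : altPrefix t l ≠ [] := by
  cases l <;> simp [altPrefix]

-- last element of the prefix table is the total
theorem altPrefix_getLast (t : Int) (l : List Int) :
    PySem.List.pyGetD (altPrefix t l) (-1) 0 = t + l.sum := by
  induction l generalizing t with
  | nil =>
    rw [show altPrefix t [] = [t] from rfl, PySem.List.pyGetD_neg_one _ _ (by simp)]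
    simp
  | cons c rest ih =>
    rw [PySem.List.pyGetD_neg_one _ _ (altPrefix_ne_nil t (c :: rest))]
    simp only [altPrefix]
    rw [List.getLast_cons (altPrefix_ne_nil _ _)]
    rw [← PySem.List.pyGetD_neg_one (altPrefix (t + c) rest) 0 (altPrefix_ne_nil _ _), ih]
    rw [List.sum_cons]; ring

-- both final indexings hit the last row
theorem pyGet_last (msa : List String) (h : msa ≠ []) :
    PySem.List.pyGet? msa ((msa.length : Int) - 1) = msa.getLast? := by
  have h1 : ((msa.length : Int) - 1) = ((msa.length - 1 : Nat) : Int) := by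
    have : 1 ≤ msa.length := List.length_pos_iff.mpr h
    omega
  rw [h1, PySem.List.pyGet?_natCast, ← List.getLast?_eq_getElem?]

-- ===== VERDICT (by name: the statement is the Claim_ definition above) =====
theorem map_msa_to_T_spec : Claim_equal_map_msa_to_T := by
  intro msa _ hpre
  unfold Spec_map_msa_to_T map_msa_to_T map_msa_to_T_alt
  simp only
  rw [pyGet_last msa hpre, PySem.List.pyGet?_neg_one]
  rw [outer_eq msa 0 PySem.Dict.empty 0]
  cases hlast : msa.getLast? with
  | none => rfl
  | some lastRow =>
    simp only
    rw [altPrefix_getLast]
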